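-- pv_equiv track=rewrite | github.com/MoeinGhaniyoun/MoeinGhaniyoun.github.io | files/Fuzzer.py | iskerneladdressmapped
-- ===== SOURCE A (Python) =====
-- def kerneltouser(address):
--     useraddress = address + 0x80000000 + 0x002000000
--     useraddress = (useraddress - 2 ** 64)
--     return useraddress
--
-- def iskerneladdressmapped(address):
--     found = False
--     physicaladdress = kerneltouser(address)
--     lowerbits = physicaladdress & 0xf000
--     for entry in list_notmapped_pages:
--         if entry == lowerbits:
--             found = True
--     return found
--
-- list_notmapped_pages = [0x3000, 0x4000, 0x5000, 0x6000, 0x7000, 0x8000, 0x9000, 0xa000, 0xb000, 0xc000, 0xd000, 0xe000,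
--                         0xf000]
-- ===== SOURCE B (Python) =====
-- def kerneltouser(address):
--     useraddress = address + 0x80000000 + 0x002000000
--     useraddress = (useraddress - 2 ** 64)
--     return useraddress
--
-- def iskerneladdressmapped(address):
--     lowerbits = kerneltouser(address) & 0xf000
--     return lowerbits >= 0x3000
-- ===== Notes on version B (the rewrite author's own statement) =====
-- stated objective: simpler
-- what changed: The loop over the not-mapped-pages list is replaced by a single closed-form comparison lowerbits >= 0x3000, valid because the & 0xf000 mask confines lowerbits to multiples of 0x1000 in [0, 0xf000] and the list is exactly the contiguous upper range 0x3000..0xf000.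
import Mathlib
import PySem

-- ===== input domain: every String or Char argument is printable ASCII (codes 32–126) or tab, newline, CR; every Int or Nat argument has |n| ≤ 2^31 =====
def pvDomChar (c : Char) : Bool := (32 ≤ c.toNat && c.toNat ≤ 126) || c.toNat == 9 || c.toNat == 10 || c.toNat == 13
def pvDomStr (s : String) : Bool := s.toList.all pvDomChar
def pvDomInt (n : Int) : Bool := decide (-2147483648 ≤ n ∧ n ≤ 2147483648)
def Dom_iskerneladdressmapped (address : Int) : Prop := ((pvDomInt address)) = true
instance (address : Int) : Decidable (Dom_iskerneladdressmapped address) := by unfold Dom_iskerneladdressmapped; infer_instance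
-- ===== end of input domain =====

-- ===== PORT A =====
-- B differs from A only past the mask: A scans the not-mapped list, B uses the closed-form comparison lowerbits >= 0x3000.
def kerneltouser (address : Int) : Int :=
  let useraddress := address + 0x80000000 + 0x002000000
  let useraddress := useraddress - 2 ^ 64
  useraddress

def list_notmapped_pages : List Int :=
  [0x3000, 0x4000, 0x5000, 0x6000, 0x7000, 0x8000, 0x9000, 0xa000, 0xb000, 0xc000, 0xd000, 0xe000, 0xf000]

def iskerneladdressmapped (address : Int) : Bool :=
  let found := false
  let physicaladdress := kerneltouser address
  let lowerbits := PySem.Int.band physicaladdress 0xf000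
  let found := list_notmapped_pages.foldl
    (fun found entry => if entry == lowerbits then true else found) found
  found

-- ===== PORT B =====
def kerneltouserB (address : Int) : Int :=
  let useraddress := address + 0x80000000 + 0x002000000
  let useraddress := useraddress - 2 ^ 64
  useraddress

def iskerneladdressmapped_alt (address : Int) : Bool :=
  let lowerbits := PySem.Int.band (kerneltouserB address) 0xf000
  decide (0x3000 ≤ lowerbits)

-- ===== PRECONDITION & SPEC =====
def Spec_iskerneladdressmapped (address : Int) (out : Bool) : Prop := out = iskerneladdressmapped_alt address
instance (address : Int) (out : Bool) : Decidable (Spec_iskerneladdressmapped address out) := by unfold Spec_iskerneladdressmapped; infer_instance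

-- ===== CLAIM (what is proved, stated in full; the proofs are below) =====
def Claim_equal_iskerneladdressmapped : Prop := ∀ (address : Int), Dom_iskerneladdressmapped address → Spec_iskerneladdressmapped address (iskerneladdressmapped address)

-- ===== LEMMAS AND PROOFS =====

-- the low 12 bits of (m &&& 0xf000) are zero
theorem nat_and_mask_mod (m : Nat) : (m &&& 61440) % 4096 = 0 := by
  have h : (m &&& 61440) % 4096 = (m &&& 61440) &&& (2 ^ 12 - 1) := by
    rw [Nat.and_two_pow_sub_one_eq_mod]
  rw [h, Nat.and_assoc, show (61440 &&& (2 ^ 12 - 1) : Nat) = 0 from by decide]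
  simp

-- masking with 0xf000 always yields a multiple of 0x1000 in [0, 0xf000]
theorem band_mask_facts (x : Int) :
    0 ≤ PySem.Int.band x 61440 ∧ PySem.Int.band x 61440 ≤ 61440 ∧
    PySem.Int.band x 61440 % 4096 = 0 := by
  unfold PySem.Int.band
  by_cases h1 : 0 ≤ x
  · rw [if_pos h1, if_pos (by norm_num)]
    have hle : x.toNat &&& Int.toNat 61440 ≤ 61440 := by
      simpa using (Nat.and_le_right (n := x.toNat) (m := 61440))
    have hmod : (x.toNat &&& Int.toNat 61440) % 4096 = 0 := by
      simpa using nat_and_mask_mod x.toNat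
    omega
  · rw [if_neg h1, if_pos (by norm_num)]
    have hle : (61440 : Nat) &&& (-x - 1).toNat ≤ 61440 := Nat.and_le_left
    have hmod : ((61440 : Nat) &&& (-x - 1).toNat) % 4096 = 0 := by
      rw [Nat.and_comm]; exact nat_and_mask_mod (-x - 1).toNat
    rw [show Int.toNat 61440 = 61440 from rfl]
    omega

-- A's accumulator loop is a membership test
theorem foldl_eq_any (L : Int) (l : List Int) (b : Bool) :
    l.foldl (fun found entry => if entry == L then true else found) b
      = (b || l.any (fun entry => entry == L)) := by
  induction l generalizing b with
  | nil => simp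
  | cons x l ih =>
    simp only [List.foldl_cons, List.any_cons, ih]
    cases hx : (x == L) <;> simp

-- ===== VERDICT (by name: the statement is the Claim_ definition above) =====
theorem iskerneladdressmapped_spec : Claim_equal_iskerneladdressmapped := by
  intro address _
  unfold Spec_iskerneladdressmapped iskerneladdressmapped iskerneladdressmapped_alt
    kerneltouser kerneltouserB
  obtain ⟨h0, h1, h2⟩ := band_mask_facts (address + 0x80000000 + 0x002000000 - 2 ^ 64)
  dsimp only
  set L := PySem.Int.band (address + 0x80000000 + 0x002000000 - 2 ^ 64) 61440 with hL
  rw [foldl_eq_any]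
  simp only [Bool.false_or, list_notmapped_pages, List.any_cons, List.any_nil,
    Bool.or_false, Bool.beq_eq_decide_eq, ← Bool.decide_or]
  rw [decide_eq_decide]
  constructor <;> intro hx <;> omega
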